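-- pv_equiv track=rewrite | github.com/tsg-ut/tsg-live-ctf-5 | crypto/HashedRotato/solver/solver.py | bytes_to_printable
-- ===== SOURCE A (Python) =====
-- def byte_to_printable(b):
--     for i in range(33, 127):
--         for j in range(33, 127):
--             if (i ^ j) == b:
--                 return i, j
--
-- def bytes_to_printable(b):
--     s = []
--     t = []
--     while b > 0:
--         c, d = byte_to_printable(b & 255)
--         b >>= 8
--         s.append(chr(c))
--         t.append(chr(d))
--     return ''.join(s[::-1]) + ''.join(t[::-1])
-- ===== SOURCE B (Python) =====
-- def pair_first(byte):
--     # single pass: j is determined as i ^ byte, just check it is printable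
--     for i in range(33, 127):
--         if 33 <= (i ^ byte) < 127:
--             return i
--
--
-- def bytes_to_printable(b):
--     s = ''
--     t = ''
--     while b > 0:
--         byte = b & 255
--         i = pair_first(byte)
--         s = chr(i) + s
--         t = chr(i ^ byte) + t
--         b >>= 8
--     return s + t
-- ===== Notes on version B (the rewrite author's own statement) =====
-- stated objective: simpler
-- what changed: The per-byte pair search computes the partner j = i ^ byte directly and checks it is printable in a single O(94) pass instead of A's O(94^2) nested scan, and the output strings are assembled by prepending instead of append-then-reverse-then-join.
-- outside the precondition, e.g. on bytes_to_printable(128): A raises TypeError, B raises TypeError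
import Mathlib
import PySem

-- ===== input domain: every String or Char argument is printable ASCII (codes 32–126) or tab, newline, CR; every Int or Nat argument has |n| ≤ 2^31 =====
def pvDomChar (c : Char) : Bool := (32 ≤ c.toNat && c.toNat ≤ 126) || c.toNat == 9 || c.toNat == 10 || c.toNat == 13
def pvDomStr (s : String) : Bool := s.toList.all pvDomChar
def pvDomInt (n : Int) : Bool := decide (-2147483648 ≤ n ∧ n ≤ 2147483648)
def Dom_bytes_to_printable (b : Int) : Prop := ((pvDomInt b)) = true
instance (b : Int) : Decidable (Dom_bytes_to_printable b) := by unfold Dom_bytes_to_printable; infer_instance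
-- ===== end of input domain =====

-- B replaces A's nested O(94^2) per-byte scan by a single pass computing j = i ^ byte directly,
-- and builds the result by prepending characters instead of append + reverse + join.

-- ===== PORT A =====

-- inner 'for j in range(33, 127): if (i ^ j) == b: return i, j'
def innerScanA (i n : Int) : List Int → Option (Int × Int)
  | [] => none
  | j :: js => if PySem.Int.bxor i j = n then some (i, j) else innerScanA i n js

-- outer 'for i in range(33, 127): …' of byte_to_printable; falls through to None
def outerScanA (n : Int) : List Int → Option (Int × Int)
  | [] => none
  | i :: is =>
      match innerScanA i n (PySem.List.pyRange 33 127 1) with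
      | some p => some p
      | none => outerScanA n is

def byteToPrintableA (n : Int) : Option (Int × Int) :=
  outerScanA n (PySem.List.pyRange 33 127 1)

-- the 'while b > 0' loop; 'b >>= 8' is ported as floor division by 256 (exact for Python's >>).
-- In the 'none' branch Python raises TypeError (unpacking None); those inputs are outside Pre_.
def loopA (b : Int) (s t : List Char) : String :=
  if _h : 0 < b then
    match byteToPrintableA (PySem.Int.band b 255) with
    | some (c, d) =>
        loopA (PySem.Int.floordiv b 256) (s ++ [Char.ofNat c.toNat]) (t ++ [Char.ofNat d.toNat])
    | none => ""
  else
    String.mk (s.reverse ++ t.reverse)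
termination_by b.toNat
decreasing_by
  rw [PySem.Int.floordiv_eq_ediv_of_pos (by norm_num)]
  omega

def bytes_to_printable (b : Int) : String := loopA b [] []

-- ===== PORT B =====

-- 'for i in range(33, 127): if 33 <= (i ^ byte) < 127: return i'
def pairFirstB (n : Int) : List Int → Option Int
  | [] => none
  | i :: is =>
      if 33 ≤ PySem.Int.bxor i n ∧ PySem.Int.bxor i n < 127 then some i else pairFirstB n is

-- 'while b > 0' loop of B; strings are built by prepending.  In the 'none' branch Python
-- raises TypeError (chr(None)); those inputs are outside Pre_.
def loopB (b : Int) (s t : List Char) : String :=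
  if _h : 0 < b then
    let n := PySem.Int.band b 255
    match pairFirstB n (PySem.List.pyRange 33 127 1) with
    | some i =>
        loopB (PySem.Int.floordiv b 256)
          (Char.ofNat i.toNat :: s) (Char.ofNat (PySem.Int.bxor i n).toNat :: t)
    | none => ""
  else
    String.mk (s ++ t)
termination_by b.toNat
decreasing_by
  rw [PySem.Int.floordiv_eq_ediv_of_pos (by norm_num)]
  omega

def bytes_to_printable_alt (b : Int) : String := loopB b [] []

-- ===== PRECONDITION & SPEC =====
-- Pre_ excludes exactly the inputs on which the Python A raises TypeError: positive b with
-- some 8-bit chunk ≥ 128 (byte_to_printable then returns None, which cannot be unpacked).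
def Pre_bytes_to_printable (b : Int) : Prop :=
  b ≤ 0 ∨
    (PySem.Int.band b 255 < 128 ∧
     PySem.Int.band (PySem.Int.floordiv b 256) 255 < 128 ∧
     PySem.Int.band (PySem.Int.floordiv b 65536) 255 < 128 ∧
     PySem.Int.band (PySem.Int.floordiv b 16777216) 255 < 128)
instance (b : Int) : Decidable (Pre_bytes_to_printable b) := by
  unfold Pre_bytes_to_printable; infer_instance

def pvWitness_bytes_to_printable : Int := 16706

def Spec_bytes_to_printable (b : Int) (out : String) : Prop := out = bytes_to_printable_alt b
instance (b : Int) (out : String) : Decidable (Spec_bytes_to_printable b out) := by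
  unfold Spec_bytes_to_printable; infer_instance

-- ===== CLAIM (what is proved, stated in full; the proofs are below) =====
def Claim_equal_bytes_to_printable : Prop :=
  ∀ (b : Int), Dom_bytes_to_printable b → Pre_bytes_to_printable b →
    Spec_bytes_to_printable b (bytes_to_printable b)

-- ===== LEMMAS AND PROOFS =====

lemma bxor_cancel {a x : Int} (ha : 0 ≤ a) (hx : 0 ≤ x) :
    PySem.Int.bxor a (PySem.Int.bxor a x) = x := by
  rw [PySem.Int.bxor_of_nonneg ha hx,
      PySem.Int.bxor_of_nonneg ha (Int.natCast_nonneg _)]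
  simp [Int.toNat_of_nonneg hx]

lemma bxor_eq_iff {i j n : Int} (hi : 0 ≤ i) (hj : 0 ≤ j) (hn : 0 ≤ n) :
    PySem.Int.bxor i j = n ↔ j = PySem.Int.bxor i n := by
  constructor
  · rintro rfl; exact (bxor_cancel hi hj).symm
  · rintro rfl; exact bxor_cancel hi hn

lemma innerScanA_eq (i n : Int) (hi : 0 ≤ i) (hn : 0 ≤ n) :
    ∀ js : List Int, (∀ j ∈ js, 0 ≤ j) →
      innerScanA i n js =
        if PySem.Int.bxor i n ∈ js then some (i, PySem.Int.bxor i n) else none := by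
  intro js
  induction js with
  | nil => intro _; simp [innerScanA]
  | cons j js ih =>
      intro hmem
      have hj : 0 ≤ j := hmem j (by simp)
      rw [innerScanA]
      by_cases h : PySem.Int.bxor i j = n
      · have hjn : j = PySem.Int.bxor i n := (bxor_eq_iff hi hj hn).1 h
        rw [if_pos h, if_pos (hjn ▸ List.mem_cons_self), hjn]
      · have hjn : j ≠ PySem.Int.bxor i n := fun he => h ((bxor_eq_iff hi hj hn).2 he)
        rw [if_neg h, ih (fun x hx => hmem x (by simp [hx]))]
        have hne : ¬ (PySem.Int.bxor i n = j) := fun e => hjn e.symm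
        simp [List.mem_cons, hne]

lemma scan_eq (n : Int) (hn : 0 ≤ n) :
    ∀ is : List Int, (∀ i ∈ is, 0 ≤ i) →
      outerScanA n is = (pairFirstB n is).map (fun i => (i, PySem.Int.bxor i n)) := by
  intro is
  induction is with
  | nil => intro _; simp [outerScanA, pairFirstB]
  | cons i is ih =>
      intro hmem
      have hi : 0 ≤ i := hmem i (by simp)
      rw [outerScanA, pairFirstB,
          innerScanA_eq i n hi hn _
            (fun j hj => le_trans (by norm_num) (PySem.List.mem_pyRange_one.1 hj).1)]
      by_cases h : 33 ≤ PySem.Int.bxor i n ∧ PySem.Int.bxor i n < 127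
      · rw [if_pos (PySem.List.mem_pyRange_one.2 h), if_pos h]
        rfl
      · rw [if_neg (fun hm => h (PySem.List.mem_pyRange_one.1 hm)), if_neg h]
        exact ih (fun x hx => hmem x (by simp [hx]))

lemma byteToPrintableA_eq (n : Int) (hn : 0 ≤ n) :
    byteToPrintableA n = (pairFirstB n (PySem.List.pyRange 33 127 1)).map
      (fun i => (i, PySem.Int.bxor i n)) :=
  scan_eq n hn _ (fun i hi => le_trans (by norm_num) (PySem.List.mem_pyRange_one.1 hi).1)

lemma loop_eq : ∀ (m : Nat) (b : Int), b.toNat ≤ m → ∀ s t : List Char,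
    loopA b s t = loopB b s.reverse t.reverse := by
  intro m
  induction m with
  | zero =>
      intro b hb s t
      have hb' : ¬ 0 < b := by omega
      rw [loopA, loopB, dif_neg hb', dif_neg hb']
  | succ m ih =>
      intro b hb s t
      by_cases hpos : 0 < b
      · have hn : 0 ≤ PySem.Int.band b 255 := by
          rw [PySem.Int.band_of_nonneg (le_of_lt hpos) (by norm_num)]
          exact Int.natCast_nonneg _
        have hlt : (PySem.Int.floordiv b 256).toNat ≤ m := by
          rw [PySem.Int.floordiv_eq_ediv_of_pos (by norm_num)]
          omega
        rw [loopA, loopB, dif_pos hpos, dif_pos hpos]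
        simp only [byteToPrintableA_eq _ hn]
        cases pairFirstB (PySem.Int.band b 255) (PySem.List.pyRange 33 127 1) with
        | none => rfl
        | some i =>
            simp only [Option.map_some]
            rw [ih _ hlt]
            simp
      · rw [loopA, loopB, dif_neg hpos, dif_neg hpos]

-- ===== VERDICT (by name: the statement is the Claim_ definition above) =====
theorem bytes_to_printable_spec : Claim_equal_bytes_to_printable := by
  intro b _ _
  unfold Spec_bytes_to_printable bytes_to_printable bytes_to_printable_alt
  simpa using loop_eq b.toNat b le_rfl [] []
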